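-- pv_equiv track=rewrite | github.com/billzorn/py-mspdebug | elftools.py | data_blocks
-- ===== SOURCE A (Python) =====
-- def data_blocks(d):
--     blocks = {}
--
--     base = None
--     nextk = None
--     for k in sorted(d.keys()):
--         if nextk is None or k > nextk:
--             base = k
--             blocks[base] = [d[k]]
--         elif k == nextk:
--             blocks[base].append(d[k])
--         else:
--             raise ValueError('keys out of order: got {}, expecting {}'.format(k, nextk))
--         nextk = k + 1
--
--     return blocks
-- ===== SOURCE B (Python) =====
-- def data_blocks(d):
--     ks = sorted(d.keys())
--     blocks = {}
--     i = 0
--     while i < len(ks):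
--         j = i + 1
--         while j < len(ks) and ks[j] == ks[j - 1] + 1:
--             j += 1
--         blocks[ks[i]] = [d[k] for k in ks[i:j]]
--         i = j
--     return blocks
-- ===== Notes on version B (the rewrite author's own statement) =====
-- stated objective: alternative
-- what changed: B splits the sorted key list into maximal consecutive runs (inner boundary scan + run slice) and builds each whole block at once, instead of A's element-at-a-time state machine with base/nextk sentinels, dict mutation per key, and a dead raise branch.
import Mathlib
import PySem

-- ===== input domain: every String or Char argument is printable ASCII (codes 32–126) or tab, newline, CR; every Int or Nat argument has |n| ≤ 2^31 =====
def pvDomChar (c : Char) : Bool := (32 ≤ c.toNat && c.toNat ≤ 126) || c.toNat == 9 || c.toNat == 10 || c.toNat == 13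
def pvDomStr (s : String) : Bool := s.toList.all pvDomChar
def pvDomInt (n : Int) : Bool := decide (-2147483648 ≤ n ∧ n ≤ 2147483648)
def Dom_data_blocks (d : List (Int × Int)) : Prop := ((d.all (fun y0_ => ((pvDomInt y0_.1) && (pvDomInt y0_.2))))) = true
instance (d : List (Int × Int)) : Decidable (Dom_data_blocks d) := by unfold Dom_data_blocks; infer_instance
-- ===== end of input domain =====

-- B groups the sorted keys by splitting off each maximal consecutive run and building the whole
-- block at once, instead of A's element-at-a-time state machine (base/nextk) mutating the dict.

-- ===== PORT A =====
-- A's loop over sorted(d.keys()); d[k] is ported as getD with a default the Python never reaches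
-- (every looked-up k comes from d.keys()).
def dbLoopA (dd : PySem.Dict Int Int) (blocks : PySem.Dict Int (List Int))
    (base : Option Int) (nextk : Option Int) : List Int → PySem.Dict Int (List Int)
  | [] => blocks
  | k :: ks =>
    match nextk with
    | none => dbLoopA dd (blocks.insert k [dd.getD k 0]) (some k) (some (k + 1)) ks
    | some n =>
      if k > n then
        dbLoopA dd (blocks.insert k [dd.getD k 0]) (some k) (some (k + 1)) ks
      else if k = n then
        dbLoopA dd (blocks.modify (base.getD 0) [] (fun vs => vs ++ [dd.getD k 0])) base
          (some (k + 1)) ks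
      else
        blocks  -- Python raises ValueError here; unreachable: sorted distinct keys are strictly increasing

def data_blocks (d : List (Int × Int)) : List (Int × List Int) :=
  let dd := PySem.Dict.ofList d
  (dbLoopA dd PySem.Dict.empty none none
    (PySem.List.sorted (PySem.Dict.keys dd) (fun k => k) false)).items

-- ===== PORT B =====
-- inner while loop of Source B: split off the longest prefix continuing prev+1, prev+2, …
def dbSplitRun (prev : Int) : List Int → List Int × List Int
  | [] => ([], [])
  | k :: ks =>
    if k = prev + 1 then
      let p := dbSplitRun k ks
      (k :: p.1, p.2)
    else ([], k :: ks)

theorem dbSplitRun_rest_length (prev : Int) (ks : List Int) :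
    (dbSplitRun prev ks).2.length ≤ ks.length := by
  induction ks generalizing prev with
  | nil => simp [dbSplitRun]
  | cons k ks ih =>
    simp only [dbSplitRun]
    split
    · exact le_trans (ih k) (Nat.le_succ _)
    · simp

-- outer while loop of Source B: take a run starting at the first remaining key, store its block, repeat
def dbGoB (dd : PySem.Dict Int Int) (blocks : PySem.Dict Int (List Int)) :
    List Int → PySem.Dict Int (List Int)
  | [] => blocks
  | k :: ks =>
    dbGoB dd (blocks.insert k ((k :: (dbSplitRun k ks).1).map (fun x => dd.getD x 0)))
      (dbSplitRun k ks).2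
  termination_by ks => ks.length
  decreasing_by
    exact Nat.lt_succ_of_le (dbSplitRun_rest_length k ks)

def data_blocks_alt (d : List (Int × Int)) : List (Int × List Int) :=
  let dd := PySem.Dict.ofList d
  (dbGoB dd PySem.Dict.empty
    (PySem.List.sorted (PySem.Dict.keys dd) (fun k => k) false)).items

-- ===== PRECONDITION & SPEC =====
def Spec_data_blocks (d : List (Int × Int)) (out : List (Int × List Int)) : Prop := out = data_blocks_alt d
instance (d : List (Int × Int)) (out : List (Int × List Int)) : Decidable (Spec_data_blocks d out) := by unfold Spec_data_blocks; infer_instance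

-- ===== CLAIM (what is proved, stated in full; the proofs are below) =====
def Claim_equal_data_blocks : Prop := ∀ (d : List (Int × Int)), Dom_data_blocks d → Spec_data_blocks d (data_blocks d)

-- ===== LEMMAS AND PROOFS =====

-- Python's blocks[base].append(v): a second in-place append to the same key composes
theorem db_modify_modify {blocks : PySem.Dict Int (List Int)} {b : Int} {xs ys : List Int} :
    (blocks.modify b [] (fun vs => vs ++ xs)).modify b [] (fun vs => vs ++ ys)
      = blocks.modify b [] (fun vs => vs ++ (xs ++ ys)) := by
  simp [PySem.Dict.modify, PySem.Dict.getD_insert_self, PySem.Dict.insert_insert_self,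
    List.append_assoc]

theorem db_modify_insert {blocks : PySem.Dict Int (List Int)} {b : Int} {v ys : List Int} :
    (blocks.insert b v).modify b [] (fun vs => vs ++ ys) = blocks.insert b (v ++ ys) := by
  simp [PySem.Dict.modify, PySem.Dict.getD_insert_self, PySem.Dict.insert_insert_self]

theorem db_modify_nil {blocks : PySem.Dict Int (List Int)} {b : Int}
    (hc : blocks.contains b = true) (hnd : blocks.keys.Nodup) :
    blocks.modify b [] (fun vs => vs) = blocks := by
  apply PySem.Dict.ext
  rw [PySem.Dict.modify, PySem.Dict.items_insert_of_contains _ _ hc]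
  conv_rhs => rw [← List.map_id blocks.items]
  refine List.map_congr_left ?_
  rintro ⟨k1, v1⟩ hp
  by_cases hb : k1 = b
  · subst hb
    have hv : blocks.getD k1 [] = v1 := PySem.Dict.getD_of_mem_items blocks hp hnd []
    simp [hv]
  · simp [hb]

-- the core invariant: inside a run, A's repeated per-key appends to blocks[base] amount to
-- B's one-shot block built from the whole run split off by dbSplitRun
theorem dbLoopA_run (dd : PySem.Dict Int Int) (ks : List Int) (h : ks.Pairwise (· < ·)) :
    ∀ (blocks : PySem.Dict Int (List Int)) (b p : Int), (∀ x ∈ ks, p < x) →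
      blocks.contains b = true → blocks.keys.Nodup →
      dbLoopA dd blocks (some b) (some (p + 1)) ks
        = dbGoB dd
            (blocks.modify b [] (fun vs => vs ++ (dbSplitRun p ks).1.map (fun x => dd.getD x 0)))
            (dbSplitRun p ks).2 := by
  induction ks with
  | nil =>
    intro blocks b p _ hc hnd
    simp only [dbLoopA, dbGoB, dbSplitRun, List.map_nil, List.append_nil]
    exact (db_modify_nil hc hnd).symm
  | cons k ks ih =>
    intro blocks b p hgt hc hnd
    have hpk : p < k := hgt k (List.mem_cons_self)
    rw [List.pairwise_cons] at h
    by_cases hk : k = p + 1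
    · have hngt : ¬ (k > p + 1) := by omega
      rw [show dbLoopA dd blocks (some b) (some (p + 1)) (k :: ks)
            = dbLoopA dd
                (blocks.modify ((some b).getD 0) [] (fun vs => vs ++ [dd.getD k 0])) (some b)
                (some (k + 1)) ks from by
            simp [dbLoopA, hngt, hk]]
      rw [ih h.2 _ b k (fun x hx => h.1 x hx)
          (by rw [PySem.Dict.modify, Option.getD]; exact PySem.Dict.contains_insert_self _ _ _)
          (by rw [PySem.Dict.modify, Option.getD]; exact PySem.Dict.nodup_keys_insert _ _ _ hnd)]
      rw [show dbSplitRun p (k :: ks) = (k :: (dbSplitRun k ks).1, (dbSplitRun k ks).2) from by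
            simp [dbSplitRun, hk]]
      simp only [Option.getD, db_modify_modify, List.map_cons]
      rfl
    · have hgtk : k > p + 1 := by omega
      rw [show dbLoopA dd blocks (some b) (some (p + 1)) (k :: ks)
            = dbLoopA dd (blocks.insert k [dd.getD k 0]) (some k) (some (k + 1)) ks from by
            simp [dbLoopA, hgtk]]
      rw [ih h.2 _ k k (fun x hx => h.1 x hx)
          (PySem.Dict.contains_insert_self _ _ _)
          (PySem.Dict.nodup_keys_insert _ _ _ hnd)]
      rw [db_modify_insert]
      rw [show dbSplitRun p (k :: ks) = ([], k :: ks) from by simp [dbSplitRun, hk]]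
      simp only [List.map_nil, List.append_nil]
      rw [db_modify_nil hc hnd]
      rw [show dbGoB dd blocks (k :: ks)
            = dbGoB dd
                (blocks.insert k ((k :: (dbSplitRun k ks).1).map (fun x => dd.getD x 0)))
                (dbSplitRun k ks).2 from by rw [dbGoB]]
      simp

theorem data_blocks_eq (d : List (Int × Int)) : data_blocks d = data_blocks_alt d := by
  unfold data_blocks data_blocks_alt
  apply congrArg PySem.Dict.items
  set dd := PySem.Dict.ofList d with hdd
  set ks := PySem.List.sorted (PySem.Dict.keys dd) (fun k => k) false with hks
  have hle : ks.Pairwise (fun a b => a ≤ b) :=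
    PySem.List.sorted_pairwise (PySem.Dict.keys dd) (fun k => k)
  have hnd : ks.Nodup :=
    (PySem.List.sorted_perm (PySem.Dict.keys dd) (fun k => k) false).nodup_iff.mpr
      (PySem.Dict.nodup_keys_ofList d)
  have hlt : ks.Pairwise (· < ·) :=
    (hle.and hnd).imp (fun hab => lt_of_le_of_ne hab.1 hab.2)
  cases hks₀ : ks with
  | nil => simp [dbLoopA, dbGoB]
  | cons k ks' =>
    rw [hks₀] at hlt
    rw [List.pairwise_cons] at hlt
    rw [show dbLoopA dd PySem.Dict.empty none none (k :: ks')
          = dbLoopA dd (PySem.Dict.empty.insert k [dd.getD k 0]) (some k) (some (k + 1)) ks'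
        from by simp [dbLoopA]]
    rw [dbLoopA_run dd ks' hlt.2 _ k k (fun x hx => hlt.1 x hx)
        (PySem.Dict.contains_insert_self _ _ _)
        (PySem.Dict.nodup_keys_insert _ _ _ (PySem.Dict.nodup_keys_empty))]
    rw [db_modify_insert]
    rw [show dbGoB dd PySem.Dict.empty (k :: ks')
          = dbGoB dd
              (PySem.Dict.empty.insert k ((k :: (dbSplitRun k ks').1).map (fun x => dd.getD x 0)))
              (dbSplitRun k ks').2 from by rw [dbGoB]]
    simp

-- ===== VERDICT (by name: the statement is the Claim_ definition above) =====
theorem data_blocks_spec : Claim_equal_data_blocks := by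
  intro d _
  unfold Spec_data_blocks
  exact data_blocks_eq d
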